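-- pv_equiv track=rewrite | github.com/Silocean/Codewars | 7ku_please_help_bob.py | err_bob
-- ===== SOURCE A (Python) =====
-- def err_bob(s):
--     #your code here
--     res = ""
--     for i, c in enumerate(s):
--         res += c
--         if i == len(s)-1 or s[i+1] in " .,:;!?":
--             if c.islower() and c not in "aeiou":
--                 res += "err"
--             if c.isupper() and c not in "AEIOU":
--                 res += "ERR"
--     return res
-- ===== SOURCE B (Python) =====
-- # Word-splitting reimplementation: tokenize the string into maximal runs between
-- # boundary characters, append the suffix to each run based on its last character.
--
-- _SEPS = " .,:;!?"
--
-- def _suffix(c):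
--     if c.islower() and c not in "aeiou":
--         return "err"
--     if c.isupper() and c not in "AEIOU":
--         return "ERR"
--     return ""
--
-- def _fix(word):
--     return word + (_suffix(word[-1]) if word else "")
--
-- def err_bob(s):
--     out = []
--     word = ""
--     for c in s:
--         if c in _SEPS:
--             out.append(_fix(word))
--             out.append(c)
--             word = ""
--         else:
--             word += c
--     out.append(_fix(word))
--     return "".join(out)
-- ===== Notes on version B (the rewrite author's own statement) =====
-- stated objective: alternative
-- what changed: B tokenizes the string into maximal runs between boundary characters and appends err/ERR once per completed word based on its last character, instead of A's per-index loop that peeks at s[i+1] for every character; it also joins collected pieces once instead of repeated string concatenation.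
import Mathlib
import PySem

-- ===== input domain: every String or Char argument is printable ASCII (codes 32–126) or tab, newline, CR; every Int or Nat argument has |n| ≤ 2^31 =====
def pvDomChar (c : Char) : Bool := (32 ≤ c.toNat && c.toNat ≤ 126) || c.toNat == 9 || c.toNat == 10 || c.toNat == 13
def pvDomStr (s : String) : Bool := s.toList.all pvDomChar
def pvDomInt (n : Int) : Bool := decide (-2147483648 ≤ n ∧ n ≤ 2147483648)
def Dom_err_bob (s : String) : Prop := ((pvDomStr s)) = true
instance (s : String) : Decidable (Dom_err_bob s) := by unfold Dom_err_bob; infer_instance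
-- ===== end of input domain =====

-- B re-implements err_bob by tokenizing the string into words between boundary characters
-- and suffixing each completed word once, instead of A's per-index one-character lookahead;
-- objective: alternative (same cost, different decomposition). Ports exact on the ASCII domain
-- (Char.isLower/isUpper agree with Python's islower/isupper there).


-- the boundary characters " .,:;!?" (the literal both Pythons use)
def errSeps : List Char := [' ', '.', ',', ':', ';', '!', '?']

-- ===== PORT A =====
def err_bob (s : String) : String :=
  String.ofList ((PySem.List.enumerate s.toList).foldl (fun (res : List Char) (ic : Int × Char) =>
    let res := res ++ [ic.2]
    if ic.1 = (s.toList.length : Int) - 1 ∨ (PySem.List.pyGet? s.toList (ic.1 + 1)).any (· ∈ errSeps) then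
      let res := if ic.2.isLower ∧ ic.2 ∉ ['a', 'e', 'i', 'o', 'u'] then res ++ "err".toList else res
      if ic.2.isUpper ∧ ic.2 ∉ ['A', 'E', 'I', 'O', 'U'] then res ++ "ERR".toList else res
    else res) [])

-- ===== PORT B =====
-- port of Source B's _suffix
def errSuffix (c : Char) : List Char :=
  if c.isLower ∧ c ∉ ['a', 'e', 'i', 'o', 'u'] then "err".toList
  else if c.isUpper ∧ c ∉ ['A', 'E', 'I', 'O', 'U'] then "ERR".toList
  else []

-- port of Source B's _fix
def errFix (w : List Char) : List Char :=
  w ++ (match w.getLast? with | some c => errSuffix c | none => [])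

-- one iteration of Source B's loop: state = (emitted output, current word)
def errStep (st : List Char × List Char) (c : Char) : List Char × List Char :=
  if c ∈ errSeps then (st.1 ++ errFix st.2 ++ [c], [])
  else (st.1, st.2 ++ [c])

def err_bob_alt (s : String) : String :=
  String.ofList ((s.toList.foldl errStep ([], [])).1 ++ errFix (s.toList.foldl errStep ([], [])).2)

-- ===== PRECONDITION & SPEC =====
def Spec_err_bob (s : String) (out : String) : Prop := out = err_bob_alt s
instance (s : String) (out : String) : Decidable (Spec_err_bob s out) := by unfold Spec_err_bob; infer_instance

-- ===== CLAIM (what is proved, stated in full; the proofs are below) =====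
def Claim_equal_err_bob : Prop := ∀ (s : String), Dom_err_bob s → Spec_err_bob s (err_bob s)

-- ===== LEMMAS AND PROOFS =====

-- does this continuation (next character, or end of string) close a word?
def errHB : List Char → Bool
  | [] => true
  | d :: _ => decide (d ∈ errSeps)

-- per-character specification both ports are reduced to
def errSpec : List Char → List Char
  | [] => []
  | c :: rest => c :: ((if errHB rest then errSuffix c else []) ++ errSpec rest)

-- A's two independent ifs, as one function
def errSuffA (c : Char) : List Char :=
  (if c.isLower ∧ c ∉ ['a', 'e', 'i', 'o', 'u'] then "err".toList else []) ++
  (if c.isUpper ∧ c ∉ ['A', 'E', 'I', 'O', 'U'] then "ERR".toList else [])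

theorem err_lower_not_upper (c : Char) (h : c.isLower = true) : c.isUpper = false := by
  simp [Char.isLower, Char.isUpper, UInt32.le_iff_toNat_le] at *
  omega

theorem errSuffA_eq (c : Char) : errSuffA c = errSuffix c := by
  unfold errSuffA errSuffix
  split_ifs with h1 h2 <;> simp_all
  exact absurd (err_lower_not_upper c h1.1) (by simp [h2])

theorem errSuffix_sep {c : Char} (h : c ∈ errSeps) : errSuffix c = [] := by
  simp [errSeps] at h
  rcases h with h | h | h | h | h | h | h <;> subst h <;> decide

theorem errHB_spec (pre : List Char) (c : Char) (rest : List Char) :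
    ((pre.length : Int) = ((pre ++ c :: rest).length : Int) - 1 ∨
      (PySem.List.pyGet? (pre ++ c :: rest) ((pre.length : Int) + 1)).any (· ∈ errSeps))
    ↔ errHB rest = true := by
  have hget : PySem.List.pyGet? (pre ++ c :: rest) ((pre.length : Int) + 1)
      = (pre ++ c :: rest)[pre.length + 1]? := by
    have := PySem.List.pyGet?_natCast (pre ++ c :: rest) (pre.length + 1)
    simpa using this
  cases rest with
  | nil =>
    constructor
    · intro _; rfl
    · intro _; left; simp
  | cons d ds =>
    have hlen : ¬ ((pre.length : Int) = ((pre ++ c :: d :: ds).length : Int) - 1) := by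
      simp; omega
    have hidx : (pre ++ c :: d :: ds)[pre.length + 1]? = some d := by
      rw [List.getElem?_append_right (by omega)]
      simp
    constructor
    · intro h
      rcases h with h | h
      · exact absurd h hlen
      · rw [hget, hidx] at h
        simpa [errHB] using h
    · intro h
      right
      rw [hget, hidx]
      simpa [errHB] using h

-- A's fold body rewritten as an append of a per-element block
theorem errA_body (cs : List Char) (res : List Char) (ic : Int × Char) :
    (let res := res ++ [ic.2]
     if ic.1 = (cs.length : Int) - 1 ∨ (PySem.List.pyGet? cs (ic.1 + 1)).any (· ∈ errSeps) then
       let res := if ic.2.isLower ∧ ic.2 ∉ ['a', 'e', 'i', 'o', 'u'] then res ++ "err".toList else res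
       if ic.2.isUpper ∧ ic.2 ∉ ['A', 'E', 'I', 'O', 'U'] then res ++ "ERR".toList else res
     else res)
    = res ++ (ic.2 :: (if ic.1 = (cs.length : Int) - 1 ∨ (PySem.List.pyGet? cs (ic.1 + 1)).any (· ∈ errSeps) then errSuffA ic.2 else [])) := by
  unfold errSuffA
  split_ifs <;> simp_all

theorem errA_flatMap (cs : List Char) :
    ∀ (suf pre : List Char), cs = pre ++ suf →
    (PySem.List.enumerate suf (pre.length : Int)).flatMap
       (fun ic => ic.2 :: (if ic.1 = (cs.length : Int) - 1 ∨ (PySem.List.pyGet? cs (ic.1 + 1)).any (· ∈ errSeps) then errSuffA ic.2 else []))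
    = errSpec suf := by
  intro suf
  induction suf with
  | nil => intro pre h; simp [PySem.List.enumerate_nil, errSpec]
  | cons c rest ih =>
    intro pre h
    rw [PySem.List.enumerate_cons, List.flatMap_cons]
    rw [show PySem.List.enumerate rest ((pre.length : Int) + 1)
          = PySem.List.enumerate rest (((pre ++ [c]).length : Int)) from by norm_num]
    rw [ih (pre ++ [c]) (by simp [h])]
    subst h
    simp only [errSpec, errSuffA_eq]
    by_cases hb : errHB rest = true
    · rw [if_pos ((errHB_spec pre c rest).mpr hb), if_pos hb]
      simp
    · rw [if_neg (fun h => hb ((errHB_spec pre c rest).mp h)),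
          if_neg (by simpa using hb)]
      simp

def errSuffLast (w : List Char) : List Char :=
  match w.getLast? with | some c => errSuffix c | none => []

theorem errFix_eq (w : List Char) : errFix w = w ++ errSuffLast w := rfl

theorem errB_loop (cs : List Char) :
    ∀ (out w : List Char),
    (cs.foldl errStep (out, w)).1 ++ errFix (cs.foldl errStep (out, w)).2
    = out ++ w ++ (if errHB cs then errSuffLast w else []) ++ errSpec cs := by
  induction cs with
  | nil => intro out w; simp [errHB, errSpec, errFix_eq]
  | cons c rest ih =>
    intro out w
    by_cases hc : c ∈ errSeps
    · rw [List.foldl_cons, show errStep (out, w) c = (out ++ errFix w ++ [c], []) from by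
          simp [errStep, hc], ih]
      have hb : errHB (c :: rest) = true := by simpa [errHB] using hc
      rw [hb]
      simp only [errSpec, errFix_eq, errSuffix_sep hc, errSuffLast]
      split_ifs <;> simp_all
    · rw [List.foldl_cons, show errStep (out, w) c = (out, w ++ [c]) from by
          simp [errStep, hc], ih]
      have hb : errHB (c :: rest) = false := by simpa [errHB] using hc
      rw [hb]
      have hlast : errSuffLast (w ++ [c]) = errSuffix c := by
        simp [errSuffLast]
      simp only [errSpec, hlast]
      split_ifs <;> simp_all

theorem errA_spec (s : String) : err_bob s = String.ofList (errSpec s.toList) := by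
  unfold err_bob
  rw [PySem.List.foldl_congr_mem (PySem.List.enumerate s.toList) _
      (fun (res : List Char) (ic : Int × Char) =>
        res ++ (ic.2 :: (if ic.1 = ((s.toList.length : Int)) - 1 ∨ (PySem.List.pyGet? s.toList (ic.1 + 1)).any (· ∈ errSeps) then errSuffA ic.2 else []))) []
      (by intro acc x _; exact errA_body s.toList acc x)]
  rw [PySem.List.foldl_append_eq_flatMap]
  rw [show ((0 : Int)) = (([] : List Char).length : Int) from by simp]
  rw [errA_flatMap s.toList s.toList [] (by simp)]
  simp

theorem errB_spec (s : String) : err_bob_alt s = String.ofList (errSpec s.toList) := by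
  unfold err_bob_alt
  rw [errB_loop s.toList [] []]
  simp [errSuffLast]

-- ===== VERDICT (by name: the statement is the Claim_ definition above) =====
theorem err_bob_spec : Claim_equal_err_bob := by
  intro s _
  unfold Spec_err_bob
  rw [errA_spec, errB_spec]
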